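-- pv_equiv track=rewrite | github.com/DavidMCKim/TIL | 220104 TIL/programmers/모의고사.py | solution
-- ===== SOURCE A (Python) =====
-- def solution(answers):
--     num1 = [1,2,3,4,5]
--     num2 = [2,1,2,3,2,4,2,5]
--     num3 = [3,3,1,1,2,2,4,4,5,5]
--     count1,count2,count3 = 0, 0, 0
--
--     for _ in range(len(answers)):
--         index1 = _%5
--         index2 = _%8
--         index3 = _%10
--
--         if num1[index1] == answers[_]:
--             count1 += 1
--         if num2[index2] == answers[_]:
--             count2 += 1
--         if num3[index3] == answers[_]:
--             count3 += 1
--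
--     max_count = max(count1,count2,count3)
--     answer = []
--
--     if max_count == count1:
--         answer.append(1)
--     if max_count == count2:
--         answer.append(2)
--     if max_count == count3:
--         answer.append(3)
--
--     return answer
-- ===== SOURCE B (Python) =====
-- def solution(answers):
--     # Histogram: count how often each (position mod 40, answer) pair occurs.
--     # 40 = lcm of the pattern lengths, so a pair determines whether each pattern matches;
--     # per-pattern counts are then aggregated over the distinct pairs, not over answers.
--     hist = {}
--     for i, a in enumerate(answers):
--         key = (i % 40, a)
--         hist[key] = hist.get(key, 0) + 1
--     pats = [[1, 2, 3, 4, 5], [2, 1, 2, 3, 2, 4, 2, 5], [3, 3, 1, 1, 2, 2, 4, 4, 5, 5]]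
--     counts = [sum(c for (r, a), c in hist.items() if pat[r % len(pat)] == a)
--               for pat in pats]
--     m = max(counts)
--     return [k for k in (1, 2, 3) if counts[k - 1] == m]
-- ===== Notes on version B (the rewrite author's own statement) =====
-- stated objective: alternative
-- what changed: Instead of matching every answer against the patterns directly, B first builds a dict histogram of (position mod 40, answer) pairs (40 = lcm of the pattern lengths) in a single pass, then computes each pattern's score by aggregating over the distinct histogram keys, and selects the winning pattern numbers with a comprehension.
import Mathlib
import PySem

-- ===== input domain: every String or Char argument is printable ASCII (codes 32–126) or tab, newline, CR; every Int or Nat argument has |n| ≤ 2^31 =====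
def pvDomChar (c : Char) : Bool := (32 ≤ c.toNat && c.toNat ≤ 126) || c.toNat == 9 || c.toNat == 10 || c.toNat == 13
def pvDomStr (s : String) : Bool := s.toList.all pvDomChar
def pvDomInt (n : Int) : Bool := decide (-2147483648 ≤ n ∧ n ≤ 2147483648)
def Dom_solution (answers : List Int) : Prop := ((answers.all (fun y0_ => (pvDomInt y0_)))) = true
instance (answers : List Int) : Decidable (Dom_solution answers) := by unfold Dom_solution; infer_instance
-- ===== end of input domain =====

-- B replaces the per-answer match loop by a dict histogram of (index mod 40, answer) pairs
-- (40 = lcm of the pattern lengths), aggregating pattern scores over the distinct keys;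
-- same return value, an alternative data-structure-driven decomposition.

-- ===== PORT A =====
-- literal transliteration: one loop over range(len(answers)) carrying three counters,
-- then max and an if-chain appending 1/2/3.
def solution (answers : List Int) : List Int :=
  let num1 : List Int := [1, 2, 3, 4, 5]
  let num2 : List Int := [2, 1, 2, 3, 2, 4, 2, 5]
  let num3 : List Int := [3, 3, 1, 1, 2, 2, 4, 4, 5, 5]
  let c :=
    (PySem.List.pyRange 0 (PySem.List.len answers) 1).foldl
      (fun (c : Int × Int × Int) i =>
        let index1 := PySem.Int.mod i 5
        let index2 := PySem.Int.mod i 8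
        let index3 := PySem.Int.mod i 10
        let ai := PySem.List.pyGetD answers i 0
        (if PySem.List.pyGetD num1 index1 0 == ai then c.1 + 1 else c.1,
         if PySem.List.pyGetD num2 index2 0 == ai then c.2.1 + 1 else c.2.1,
         if PySem.List.pyGetD num3 index3 0 == ai then c.2.2 + 1 else c.2.2))
      (0, 0, 0)
  let max_count := max c.1 (max c.2.1 c.2.2)
  let answer : List Int := []
  let answer := if max_count == c.1 then answer ++ [1] else answer
  let answer := if max_count == c.2.1 then answer ++ [2] else answer
  let answer := if max_count == c.2.2 then answer ++ [3] else answer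
  answer

-- ===== PORT B =====
-- hist[key] = hist.get(key, 0) + 1  over key = (i % 40, a)
def solution_alt (answers : List Int) : List Int :=
  let hist : PySem.Dict (Int × Int) Int :=
    (PySem.List.enumerate answers 0).foldl
      (fun d p =>
        let key : Int × Int := (PySem.Int.mod p.1 40, p.2)
        d.insert key (d.getD key 0 + 1))
      PySem.Dict.empty
  let pats : List (List Int) :=
    [[1, 2, 3, 4, 5], [2, 1, 2, 3, 2, 4, 2, 5], [3, 3, 1, 1, 2, 2, 4, 4, 5, 5]]
  let counts := pats.map (fun pat =>
    hist.items.foldl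
      (fun acc kv =>
        acc + (if PySem.List.pyGetD pat (PySem.Int.mod kv.1.1 (PySem.List.len pat)) 0 == kv.1.2
               then kv.2 else 0))
      0)
  let m := (PySem.List.max? counts (fun x => x)).getD 0
  ([1, 2, 3] : List Int).foldl
    (fun acc k => if PySem.List.pyGetD counts (k - 1) 0 == m then acc ++ [k] else acc) []

-- ===== PRECONDITION & SPEC =====
def Spec_solution (answers : List Int) (out : List Int) : Prop := out = solution_alt answers
instance (answers : List Int) (out : List Int) : Decidable (Spec_solution answers out) := by unfold Spec_solution; infer_instance

-- ===== CLAIM (what is proved, stated in full; the proofs are below) =====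
def Claim_equal_solution : Prop := ∀ (answers : List Int), Dom_solution answers → Spec_solution answers (solution answers)

-- ===== LEMMAS AND PROOFS =====

-- the triple fold of port A computes three independent counting folds componentwise
theorem triple_fold (l : List Int) (p q r : Int → Bool) (a b c : Int) :
    l.foldl (fun (s : Int × Int × Int) i =>
        (if p i then s.1 + 1 else s.1,
         if q i then s.2.1 + 1 else s.2.1,
         if r i then s.2.2 + 1 else s.2.2)) (a, b, c)
      = (l.foldl (fun x i => if p i then x + 1 else x) a,
         l.foldl (fun x i => if q i then x + 1 else x) b,
         l.foldl (fun x i => if r i then x + 1 else x) c) := by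
  induction l generalizing a b c with
  | nil => rfl
  | cons x t ih => simp only [List.foldl]; rw [ih]

-- over a nodup list containing x, the sum of an x-gated value is that value
theorem sum_map_single {κ : Type} [DecidableEq κ] (l : List κ) (x : κ) (c : κ → Int)
    (hnd : l.Nodup) (hx : x ∈ l) :
    (l.map (fun k => if k = x then c k else 0)).sum = c x := by
  induction l with
  | nil => cases hx
  | cons y t ih =>
    rcases List.nodup_cons.mp hnd with ⟨hyt, hnt⟩
    by_cases hxy : y = x
    · subst hxy
      have hz : (t.map (fun k => if k = y then c k else 0)).sum = 0 := by
        apply List.sum_eq_zero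
        intro z hz'
        rcases List.mem_map.mp hz' with ⟨k, hk, rfl⟩
        have hk' : k ≠ y := fun e => hyt (e ▸ hk)
        simp [hk']
      simp [hz]
    · have hx' : x ∈ t := by
        rcases List.mem_cons.mp hx with h | h
        · exact absurd h.symm hxy
        · exact h
      simp only [List.map_cons, List.sum_cons, if_neg hxy, ih hnt hx', zero_add]

theorem sum_dedup_count {κ : Type} [DecidableEq κ] [BEq κ] [LawfulBEq κ]
    (P : κ → Bool) (l : List κ) (hnd : l.Nodup) :
    ∀ (xs : List κ), (∀ x ∈ xs, x ∈ l) →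
      (l.map (fun k => if P k then (xs.count k : Int) else 0)).sum = (xs.countP P : Int) := by
  intro xs
  induction xs with
  | nil => intro _; simp
  | cons x t ih =>
    intro hmem
    have hx : x ∈ l := hmem x (List.mem_cons_self)
    have ht : ∀ y ∈ t, y ∈ l := fun y hy => hmem y (List.mem_cons_of_mem _ hy)
    have hcount : ∀ k : κ, ((x :: t).count k : Int) = (t.count k : Int) + (if k = x then 1 else 0) := by
      intro k
      by_cases hkx : k = x
      · subst hkx; simp [List.count_cons_self]
      · have hxk : ¬ x = k := fun e => hkx e.symm
        simp [hkx, hxk]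
    have hsplit :
        (l.map (fun k => if P k then ((x :: t).count k : Int) else 0)).sum
          = (l.map (fun k => if P k then (t.count k : Int) else 0)).sum
            + (l.map (fun k => if k = x then (if P k then 1 else 0) else 0)).sum := by
      rw [← List.sum_map_add]
      apply congrArg List.sum
      apply List.map_congr_left
      intro k _
      by_cases hp : P k <;> by_cases hkx : k = x <;> simp [hp, hkx, hcount k] <;> split <;> simp_all
    rw [hsplit, ih ht, sum_map_single l x _ hnd hx, List.countP_cons]
    push_cast
    by_cases hp : P x <;> simp [hp]

theorem count_hist_eq (answers : List Int) (pat : List Int) (d : Int)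
    (hd : PySem.List.len pat = d) (hpos : (0:Int) < d) (hdvd : d ∣ 40) :
    (((PySem.List.enumerate answers 0).foldl
        (fun (dic : PySem.Dict (Int × Int) Int) p =>
          let key : Int × Int := (PySem.Int.mod p.1 40, p.2)
          dic.insert key (dic.getD key 0 + 1))
        PySem.Dict.empty).items).foldl
      (fun acc kv =>
        acc + (if PySem.List.pyGetD pat (PySem.Int.mod kv.1.1 (PySem.List.len pat)) 0 == kv.1.2
               then kv.2 else 0))
      0
    = (PySem.List.pyRange 0 (PySem.List.len answers) 1).foldl
        (fun acc i =>
          if PySem.List.pyGetD pat (PySem.Int.mod i d) 0 == PySem.List.pyGetD answers i 0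
          then acc + 1 else acc)
        0 := by
  subst hd
  set f : Int × Int → Int × Int := fun p => (PySem.Int.mod p.1 40, p.2) with hf
  set keys : List (Int × Int) := (PySem.List.enumerate answers 0).map f with hkeys
  set P : Int × Int → Bool :=
    fun k => PySem.List.pyGetD pat (PySem.Int.mod k.1 (PySem.List.len pat)) 0 == k.2 with hP
  have hhist :
      (PySem.List.enumerate answers 0).foldl
        (fun (dic : PySem.Dict (Int × Int) Int) p =>
          dic.insert (f p) (dic.getD (f p) 0 + 1)) PySem.Dict.empty
        = PySem.Dict.counter keys := by
    rw [hkeys, ← PySem.Dict.foldl_insert_getD_add_one_eq_counter, List.foldl_map]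
  have hinner :
      ((PySem.Set.ofList keys).map (fun k => if P k then (keys.count k : Int) else 0)).sum
        = (keys.countP P : Int) :=
    sum_dedup_count P (PySem.Set.ofList keys) (PySem.Set.nodup_ofList keys) keys
      (fun x hx => (PySem.Set.mem_ofList keys x).mpr hx)
  have hcountP :
      keys.countP P
        = (PySem.List.pyRange 0 (PySem.List.len answers) 1).countP
            (fun i => PySem.List.pyGetD pat (PySem.Int.mod i (PySem.List.len pat)) 0
                        == PySem.List.pyGetD answers i 0) := by
    rw [hkeys, List.countP_map,
        PySem.List.enumerate_eq_map_pyRange (xs := answers) (d := 0), List.countP_map]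
    apply List.countP_congr
    intro i hi
    have h0i : 0 ≤ i := by
      have := PySem.List.mem_pyRange_one.mp hi; omega
    have hmm : PySem.Int.mod (PySem.Int.mod i 40) (PySem.List.len pat)
        = PySem.Int.mod i (PySem.List.len pat) := by
      rw [PySem.Int.mod_eq_emod_of_pos (by norm_num : (0:Int) < 40),
          PySem.Int.mod_eq_emod_of_pos hpos, PySem.Int.mod_eq_emod_of_pos hpos,
          Int.emod_emod_of_dvd _ hdvd]
    simp only [hP, hf, Function.comp_apply]
    rw [hmm]
  rw [hhist, PySem.Dict.items_counter, List.foldl_map,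
      PySem.List.foldl_add (g := fun k => if P k then (keys.count k : Int) else 0),
      PySem.List.foldl_if_add_one]
  rw [hinner, hcountP]

-- A's max + if-chain equals B's max(counts) + fold over (1,2,3) with counts[k-1]
set_option maxHeartbeats 1000000 in
theorem sel_eq (c1 c2 c3 : Int) :
    (let max_count := max c1 (max c2 c3)
     let answer : List Int := []
     let answer := if max_count == c1 then answer ++ [1] else answer
     let answer := if max_count == c2 then answer ++ [2] else answer
     let answer := if max_count == c3 then answer ++ [3] else answer
     answer)
      = (let counts : List Int := [c1, c2, c3]
         let m := (PySem.List.max? counts (fun x => x)).getD 0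
         ([1, 2, 3] : List Int).foldl
           (fun acc k => if PySem.List.pyGetD counts (k - 1) 0 == m then acc ++ [k] else acc) []) := by
  have hm : (PySem.List.max? [c1, c2, c3] (fun x => x)).getD 0 = max c1 (max c2 c3) := by
    rw [PySem.List.max?_id_cons]
    simp [List.foldl, max_assoc]
  have e1 : PySem.List.pyGetD [c1, c2, c3] ((1:Int) - 1) 0 = c1 := by
    norm_num [PySem.List.pyGetD, PySem.List.pyGet?, PySem.List.pyIdx?]
    try rfl
  have e2 : PySem.List.pyGetD [c1, c2, c3] ((2:Int) - 1) 0 = c2 := by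
    norm_num [PySem.List.pyGetD, PySem.List.pyGet?, PySem.List.pyIdx?]
    try rfl
  have e3 : PySem.List.pyGetD [c1, c2, c3] ((3:Int) - 1) 0 = c3 := by
    norm_num [PySem.List.pyGetD, PySem.List.pyGet?, PySem.List.pyIdx?]
    try rfl
  simp only [hm, List.foldl, e1, e2, e3, beq_iff_eq]
  by_cases h1 : max c1 (max c2 c3) = c1 <;>
    by_cases h2 : max c1 (max c2 c3) = c2 <;>
      by_cases h3 : max c1 (max c2 c3) = c3 <;>
        simp only [h1, h2, h3, eq_comm, if_true, if_false, List.nil_append] <;>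
          norm_num <;>
            (exfalso
             rcases max_choice c1 (max c2 c3) with h | h <;>
               rcases max_choice c2 c3 with h' | h' <;> simp_all <;> omega)

theorem solution_eq_alt (answers : List Int) : solution answers = solution_alt answers := by
  unfold solution solution_alt
  simp only [List.map_cons, List.map_nil]
  rw [triple_fold (PySem.List.pyRange 0 (PySem.List.len answers) 1)
        (fun i => PySem.List.pyGetD [1, 2, 3, 4, 5] (PySem.Int.mod i 5) 0 == PySem.List.pyGetD answers i 0)
        (fun i => PySem.List.pyGetD [2, 1, 2, 3, 2, 4, 2, 5] (PySem.Int.mod i 8) 0 == PySem.List.pyGetD answers i 0)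
        (fun i => PySem.List.pyGetD [3, 3, 1, 1, 2, 2, 4, 4, 5, 5] (PySem.Int.mod i 10) 0 == PySem.List.pyGetD answers i 0)]
  rw [← count_hist_eq answers [1, 2, 3, 4, 5] 5 (by decide) (by decide) (by decide),
      ← count_hist_eq answers [2, 1, 2, 3, 2, 4, 2, 5] 8 (by decide) (by decide) (by decide),
      ← count_hist_eq answers [3, 3, 1, 1, 2, 2, 4, 4, 5, 5] 10 (by decide) (by decide) (by decide)]
  exact sel_eq _ _ _

-- ===== VERDICT (by name: the statement is the Claim_ definition above) =====
theorem solution_spec : Claim_equal_solution := by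
  intro answers _
  exact solution_eq_alt answers
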